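-- pv_equiv track=rewrite | github.com/zxzimeng/leetcodepy | 2165smallestvaluerearranged.py | smallestNumber
-- ===== SOURCE A (Python) =====
-- def smallestNumber(num: int) -> int:
--     p = True
--
--     if num < 0:
--         p = False
--         num *= -1
--
--     if num == 0:
--         return num
--
--     numlist = list(str(num))
--     numlist.sort()
--
--     zeros = numlist.count('0')
--     numlist = numlist[zeros:]
--     minnum = ''
--
--     if p:
--         for x in numlist:
--             minnum += x
--         minnum = int(minnum[0] + '0' * zeros + minnum[1:])
--     else:
--         numlist.reverse()
--         for x in numlist:
--             minnum += x
--         minnum = -1 * int(minnum + '0' * zeros)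
--
--     return minnum
-- ===== SOURCE B (Python) =====
-- def smallestNumber(num: int) -> int:
--     if num == 0:
--         return 0
--     digits = list(str(abs(num)))
--     zeros = digits.count('0')
--     asc = ''
--     for c in '123456789':
--         asc += c * digits.count(c)
--     if num > 0:
--         return int(asc[0] + '0' * zeros + asc[1:])
--     return -int(asc[::-1] + '0' * zeros)
-- ===== Notes on version B (the rewrite author's own statement) =====
-- stated objective: alternative
-- what changed: B replaces A's comparison sort of the digit characters (sort, count zeros, slice, reverse) with a counting-sort reconstruction: it counts each digit once and rebuilds the result directly from the '1'..'9' buckets, with the zeros spliced in after the leading digit (positive) or at the end (negative).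
import Mathlib
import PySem

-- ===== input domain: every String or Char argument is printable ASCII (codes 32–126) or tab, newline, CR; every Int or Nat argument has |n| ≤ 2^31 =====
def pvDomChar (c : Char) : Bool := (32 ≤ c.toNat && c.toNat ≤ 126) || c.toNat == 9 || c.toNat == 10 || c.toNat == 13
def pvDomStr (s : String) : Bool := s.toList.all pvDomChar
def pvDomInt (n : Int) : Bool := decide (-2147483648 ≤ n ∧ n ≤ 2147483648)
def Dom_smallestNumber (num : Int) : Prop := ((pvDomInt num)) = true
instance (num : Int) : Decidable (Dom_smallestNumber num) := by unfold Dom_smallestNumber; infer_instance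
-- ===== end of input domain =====

-- B rebuilds the digits from a counting table ('counting sort') instead of A's comparison sort + slice + reverse; same value everywhere.

-- ===== PORT A =====
-- literal transliteration of Source A; the `.getD` defaults after pyGet?/ofChars? stand for
-- IndexError/ValueError branches that are unreachable (a positive int always has a nonzero digit).
def smallestNumber (num : Int) : Int :=
  let p : Bool := true
  let pn : Bool × Int := if num < 0 then (false, num * (-1)) else (p, num)
  let p := pn.1
  let num := pn.2
  if num = 0 then num
  else
    let numlist : List Char := (PySem.Int.toStr num).toList
    let numlist := PySem.List.sorted numlist (fun x => x) false
    let zeros : Int := (PySem.List.count numlist '0' : Nat)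
    let numlist := PySem.List.slice numlist (some zeros) none
    let minnum : List Char := []
    if p then
      let minnum := numlist.foldl (fun acc x => acc ++ [x]) minnum
      (PySem.Int.ofChars? (((PySem.List.pyGet? minnum 0).getD ' ') ::
        (PySem.List.pyRepeat ['0'] zeros ++ PySem.List.slice minnum (some 1) none))).getD 0
    else
      let numlist := numlist.reverse
      let minnum := numlist.foldl (fun acc x => acc ++ [x]) minnum
      (-1) * (PySem.Int.ofChars? (minnum ++ PySem.List.pyRepeat ['0'] zeros)).getD 0

-- ===== PORT B =====
-- literal transliteration of Source B (counting-sort reconstruction)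
def smallestNumber_alt (num : Int) : Int :=
  if num = 0 then 0
  else
    let digits : List Char := (PySem.Int.toStr |num|).toList
    let zeros : Int := (PySem.List.count digits '0' : Nat)
    let asc : List Char :=
      ['1','2','3','4','5','6','7','8','9'].foldl
        (fun acc c => acc ++ PySem.List.pyRepeat [c] ((PySem.List.count digits c : Nat) : Int)) []
    if num > 0 then
      (PySem.Int.ofChars? (((PySem.List.pyGet? asc 0).getD ' ') ::
        (PySem.List.pyRepeat ['0'] zeros ++ PySem.List.slice asc (some 1) none))).getD 0
    else
      -(PySem.Int.ofChars? ((PySem.List.slice? asc none none (-1)).getD [] ++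
        PySem.List.pyRepeat ['0'] zeros)).getD 0

-- ===== PRECONDITION & SPEC =====
def Spec_smallestNumber (num : Int) (out : Int) : Prop := out = smallestNumber_alt num
instance (num : Int) (out : Int) : Decidable (Spec_smallestNumber num out) := by unfold Spec_smallestNumber; infer_instance

-- ===== CLAIM (what is proved, stated in full; the proofs are below) =====
def Claim_equal_smallestNumber : Prop := ∀ (num : Int), Dom_smallestNumber num → Spec_smallestNumber num (smallestNumber num)

-- ===== LEMMAS AND PROOFS =====

-- the ten decimal digit characters, ascending
def pvDigitChars : List Char := ['0','1','2','3','4','5','6','7','8','9']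

theorem pv_digitChar_mem {m : Nat} (h : m < 10) : Nat.digitChar m ∈ pvDigitChars := by
  interval_cases m <;> decide

theorem pv_toDigitsCore_mem (f : Nat) : ∀ (n : Nat) (acc : List Char),
    (∀ c ∈ acc, c ∈ pvDigitChars) → ∀ c ∈ Nat.toDigitsCore 10 f n acc, c ∈ pvDigitChars := by
  induction f with
  | zero => intro n acc hacc c hc; exact hacc c hc
  | succ f ih =>
    intro n acc hacc c hc
    simp only [Nat.toDigitsCore] at hc
    have hd : Nat.digitChar (n % 10) ∈ pvDigitChars :=
      pv_digitChar_mem (Nat.mod_lt _ (by norm_num))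
    by_cases h0 : n / 10 = 0
    · simp only [h0, if_pos] at hc
      rcases List.mem_cons.mp hc with h | h
      · exact h ▸ hd
      · exact hacc c h
    · rw [if_neg h0] at hc
      exact ih (n / 10) _ (by
        intro x hx
        rcases List.mem_cons.mp hx with h | h
        · exact h ▸ hd
        · exact hacc x h) c hc

theorem pv_toChars_mem {n : Int} (hn : 0 ≤ n) :
    ∀ c ∈ PySem.Int.toChars n, c ∈ pvDigitChars := by
  unfold PySem.Int.toChars
  rw [if_neg (by omega)]
  exact pv_toDigitsCore_mem _ _ [] (by intro c hc; cases hc)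

-- counting-sort reconstruction is a permutation of the data
theorem pv_flatMap_replicate_perm : ∀ (ks ds : List Char), ks.Nodup →
    (∀ c ∈ ds, c ∈ ks) →
    (ks.flatMap (fun k => List.replicate (List.count k ds) k)).Perm ds := by
  intro ks
  induction ks with
  | nil =>
    intro ds _ hmem
    have : ds = [] := List.eq_nil_iff_forall_not_mem.mpr (fun a ha => absurd (hmem a ha) (List.not_mem_nil))
    simp [this]
  | cons k ks ih =>
    intro ds hnd hmem
    have hnd' : ks.Nodup := hnd.of_cons
    have hknot : k ∉ ks := by
      have := List.nodup_cons.mp hnd; exact this.1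
    set ds' := ds.filter (fun x => !(x == k)) with hds'
    have hmem' : ∀ c ∈ ds', c ∈ ks := by
      intro c hc
      have h1 := List.of_mem_filter hc
      have h2 := List.mem_of_mem_filter hc
      have hck : c ≠ k := by simpa using h1
      rcases List.mem_cons.mp (hmem c h2) with h | h
      · exact absurd h hck
      · exact h
    have hcnt : ∀ k' ∈ ks, List.count k' ds' = List.count k' ds := by
      intro k' hk'
      apply List.count_filter
      simp only [Bool.not_eq_eq_eq_not, Bool.not_true, beq_eq_false_iff_ne, ne_eq]
      intro h; exact hknot (h ▸ hk')
    have hcongr : ks.flatMap (fun k' => List.replicate (List.count k' ds) k')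
        = ks.flatMap (fun k' => List.replicate (List.count k' ds') k') := by
      rw [List.flatMap_def, List.flatMap_def]
      congr 1
      apply List.map_congr_left
      intro a ha
      rw [hcnt a ha]
    have htail : (ks.flatMap (fun k' => List.replicate (List.count k' ds) k')).Perm ds' := by
      rw [hcongr]; exact ih ds' hnd' hmem'
    have hsplit : (ds.filter (fun x => x == k) ++ ds').Perm ds := List.filter_append_perm _ ds
    have hrep : ds.filter (fun x => x == k) = List.replicate (List.count k ds) k :=
      List.filter_beq k
    have h1 : ((k :: ks).flatMap (fun k' => List.replicate (List.count k' ds) k'))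
        = ds.filter (fun x => x == k)
            ++ ks.flatMap (fun k' => List.replicate (List.count k' ds) k') := by
      rw [List.flatMap_cons, hrep]
    rw [h1]
    exact List.Perm.trans ((List.Perm.refl _).append htail) hsplit

-- ascending buckets give a (weakly) sorted list
theorem pv_flatMap_replicate_pairwise : ∀ (ks : List Char) (f : Char → Nat),
    ks.Pairwise (· < ·) →
    (ks.flatMap (fun k => List.replicate (f k) k)).Pairwise (· ≤ ·) := by
  intro ks
  induction ks with
  | nil => intro f _; simp
  | cons k ks ih =>
    intro f hp
    have hp' : ks.Pairwise (· < ·) := hp.of_cons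
    have hklt : ∀ k' ∈ ks, k < k' := by
      have := List.pairwise_cons.mp hp; exact this.1
    rw [List.flatMap_cons, List.pairwise_append]
    refine ⟨?_, ih f hp', ?_⟩
    · exact List.pairwise_replicate.mpr (Or.inr (le_refl k))
    · intro a ha b hb
      have hak : a = k := List.eq_of_mem_replicate ha
      rcases List.mem_flatMap.mp hb with ⟨k', hk', hbk'⟩
      have hbk : b = k' := List.eq_of_mem_replicate hbk'
      rw [hak, hbk]
      exact le_of_lt (hklt k' hk')

-- the key fact: Python's sort of a digit list IS the counting-sort reconstruction
theorem pv_sorted_eq_buckets (ds : List Char) (h : ∀ c ∈ ds, c ∈ pvDigitChars) :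
    PySem.List.sorted ds (fun x => x) false
      = List.replicate (List.count '0' ds) '0'
        ++ ['1','2','3','4','5','6','7','8','9'].flatMap
             (fun k => List.replicate (List.count k ds) k) := by
  have hperm := pv_flatMap_replicate_perm pvDigitChars ds (by decide) h
  have hpw := pv_flatMap_replicate_pairwise pvDigitChars (fun k => List.count k ds) (by decide)
  have hsplit : pvDigitChars.flatMap (fun k => List.replicate (List.count k ds) k)
      = List.replicate (List.count '0' ds) '0'
        ++ ['1','2','3','4','5','6','7','8','9'].flatMap
             (fun k => List.replicate (List.count k ds) k) := by
    simp [pvDigitChars, List.flatMap_cons]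
  rw [← hsplit]
  exact PySem.List.sorted_id_eq_of_perm_of_pairwise ds _ hperm hpw

-- B's bucket loop, closed form
theorem pv_asc_loop (ds : List Char) :
    ['1','2','3','4','5','6','7','8','9'].foldl
        (fun acc c => acc ++ PySem.List.pyRepeat [c] ((PySem.List.count ds c : Nat) : Int)) []
      = ['1','2','3','4','5','6','7','8','9'].flatMap
          (fun k => List.replicate (List.count k ds) k) := by
  rw [PySem.List.foldl_append_eq_flatMap]
  simp [PySem.List.pyRepeat_singleton, PySem.List.count_eq]

-- A's middle section (sort, count, slice, copy loop) equals B's buckets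
theorem pv_mid (ds : List Char) (h : ∀ c ∈ ds, c ∈ pvDigitChars) :
    PySem.List.slice (PySem.List.sorted ds (fun x => x) false)
        (some ((PySem.List.count (PySem.List.sorted ds (fun x => x) false) '0' : Nat) : Int)) none
      = ['1','2','3','4','5','6','7','8','9'].flatMap
          (fun k => List.replicate (List.count k ds) k) := by
  have hz : PySem.List.count (PySem.List.sorted ds (fun x => x) false) '0' = List.count '0' ds := by
    rw [PySem.List.count_eq]
    exact (PySem.List.sorted_perm ds (fun x => x) false).count_eq '0'
  rw [hz, PySem.List.slice_from _ (by positivity), pv_sorted_eq_buckets ds h]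
  have : ((List.count '0' ds : Int)).toNat = (List.replicate (List.count '0' ds) '0').length := by
    simp
  rw [this, List.drop_left]

-- ===== VERDICT (by name: the statement is the Claim_ definition above) =====
theorem smallestNumber_spec : Claim_equal_smallestNumber := by
  unfold Claim_equal_smallestNumber
  intro num _
  unfold Spec_smallestNumber smallestNumber smallestNumber_alt
  rcases lt_trichotomy num 0 with hneg | hzero | hpos
  · -- negative: A flips the sign and takes the reversed branch
    have habs : |num| = -num := abs_of_neg hneg
    simp only [if_pos hneg, if_neg (by omega : ¬ num * (-1) = 0), if_neg (by omega : ¬ num = 0),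
      if_neg (by omega : ¬ num > 0)]
    have hds : (PySem.Int.toStr (num * (-1))).toList = (PySem.Int.toStr |num|).toList := by
      rw [habs]; ring_nf
    set ds := (PySem.Int.toStr |num|).toList with hdsdef
    have hmem : ∀ c ∈ ds, c ∈ pvDigitChars := by
      rw [hdsdef, PySem.Int.toList_toStr]
      exact pv_toChars_mem (by rw [habs]; omega)
    have hzeros : PySem.List.count (PySem.List.sorted ds (fun x => x) false) '0'
        = List.count '0' ds := by
      rw [PySem.List.count_eq]
      exact (PySem.List.sorted_perm ds (fun x => x) false).count_eq '0'
    rw [hds, PySem.List.foldl_append_singleton_eq_self, pv_mid ds hmem, pv_asc_loop ds,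
      PySem.List.slice?_none_none_neg_one, hzeros]
    simp only [Bool.false_eq_true, if_false, PySem.List.foldl_append_singleton_eq_self,
      List.nil_append, PySem.List.count_eq, Option.getD_some, neg_one_mul]
  · -- zero
    simp [hzero]
  · -- positive
    have habs : |num| = num := abs_of_pos hpos
    simp only [if_neg (by omega : ¬ num < 0), if_neg (by omega : ¬ num = 0), if_pos hpos]
    set ds := (PySem.Int.toStr num).toList with hdsdef
    have hds : (PySem.Int.toStr |num|).toList = ds := by rw [habs]
    have hmem : ∀ c ∈ ds, c ∈ pvDigitChars := by
      rw [hdsdef, PySem.Int.toList_toStr]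
      exact pv_toChars_mem (by omega)
    have hzeros : PySem.List.count (PySem.List.sorted ds (fun x => x) false) '0'
        = List.count '0' ds := by
      rw [PySem.List.count_eq]
      exact (PySem.List.sorted_perm ds (fun x => x) false).count_eq '0'
    rw [hds, PySem.List.foldl_append_singleton_eq_self, pv_mid ds hmem, pv_asc_loop ds, hzeros]
    simp only [if_true, List.nil_append, PySem.List.count_eq]
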